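-- pv_equiv track=rewrite | github.com/KevinCarr42/AI-Translation-Pipeline | translate/document.py | reassemble_paragraphs
-- ===== SOURCE A (Python) =====
-- def reassemble_paragraphs(translated_chunks, chunk_metadata):
--     lines_dict = {}
--     for translated_chunk, metadata in zip(translated_chunks, chunk_metadata):
--         line_idx = metadata['line_idx']
--         if line_idx not in lines_dict:
--             lines_dict[line_idx] = []
--
--         lines_dict[line_idx].append(translated_chunk)
--
--     for line_idx in lines_dict:
--         if isinstance(lines_dict[line_idx], list):
--             lines_dict[line_idx] = ' '.join(lines_dict[line_idx])
--
--     return '\n'.join(lines_dict[i] for i in sorted(lines_dict.keys()))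
-- ===== SOURCE B (Python) =====
-- def reassemble_paragraphs(translated_chunks, chunk_metadata):
--     pairs = [(m['line_idx'], c) for c, m in zip(translated_chunks, chunk_metadata)]
--     return '\n'.join(
--         ' '.join(c for i, c in pairs if i == idx)
--         for idx in sorted({i for i, _ in pairs})
--     )
-- ===== Notes on version B (the rewrite author's own statement) =====
-- stated objective: simpler
-- what changed: Replaces A's mutable dict-of-lists accumulation plus an in-place join pass by a flat list of (line_idx, chunk) pairs that is filtered per distinct sorted index and joined directly.
import Mathlib
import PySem

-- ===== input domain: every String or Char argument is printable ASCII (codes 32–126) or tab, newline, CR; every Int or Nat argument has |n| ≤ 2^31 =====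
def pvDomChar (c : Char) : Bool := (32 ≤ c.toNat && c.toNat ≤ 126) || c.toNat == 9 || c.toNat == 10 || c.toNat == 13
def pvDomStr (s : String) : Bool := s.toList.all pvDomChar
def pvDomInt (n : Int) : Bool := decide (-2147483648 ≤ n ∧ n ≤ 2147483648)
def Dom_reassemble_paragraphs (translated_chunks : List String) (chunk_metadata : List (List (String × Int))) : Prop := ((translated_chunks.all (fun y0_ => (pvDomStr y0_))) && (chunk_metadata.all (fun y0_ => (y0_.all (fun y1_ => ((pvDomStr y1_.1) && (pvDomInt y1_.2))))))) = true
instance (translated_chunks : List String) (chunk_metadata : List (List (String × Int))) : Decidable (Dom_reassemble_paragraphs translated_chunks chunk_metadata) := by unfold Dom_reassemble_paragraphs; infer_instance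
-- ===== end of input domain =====

-- B replaces A's dict-of-lists accumulation by a flat (line_idx, chunk) pair list filtered per distinct sorted index (objective: simpler).

-- ===== PORT A =====
-- second loop + return of A: the value lists were already replaced by their ' '-joins
-- (the isinstance check is always true: every value is a list; in-place value rewrite = rebuild in items order);
-- lines_dict[i] for i a key never raises, so getD's default "" is never used
def pvJoinSorted (lines_dict2 : PySem.Dict Int String) : String :=
  PySem.Str.join "\n" ((PySem.List.sorted lines_dict2.keys (fun x => x) false).map (fun i => lines_dict2.getD i ""))

-- loop body of A's first loop: look up 'line_idx', seed [] if the key is new, append the chunk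
-- (metadata['line_idx'] raises KeyError when the key is absent — excluded by Pre_; getD's default 0 is never used there)
def pvStepA (d : PySem.Dict Int (List String)) (p : String × List (String × Int)) : PySem.Dict Int (List String) :=
  (if d.contains ((PySem.Dict.mk p.2).getD "line_idx" 0)
   then d
   else d.insert ((PySem.Dict.mk p.2).getD "line_idx" 0) []).modify
    ((PySem.Dict.mk p.2).getD "line_idx" 0) [] (fun l => l ++ [p.1])

def reassemble_paragraphs (translated_chunks : List String) (chunk_metadata : List (List (String × Int))) : String :=
  pvJoinSorted
    (((translated_chunks.zip chunk_metadata).foldl pvStepA PySem.Dict.empty).items.foldl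
      (fun d kv => d.insert kv.1 (PySem.Str.join " " kv.2)) PySem.Dict.empty)

-- ===== PORT B =====
def pvBodyB (pairs : List (Int × String)) : String :=
  PySem.Str.join "\n" ((PySem.List.sorted (PySem.Set.ofList (pairs.map Prod.fst)) (fun x => x) false).map
    (fun idx => PySem.Str.join " " ((pairs.filter (fun q => q.1 == idx)).map Prod.snd)))

def reassemble_paragraphs_alt (translated_chunks : List String) (chunk_metadata : List (List (String × Int))) : String :=
  pvBodyB ((translated_chunks.zip chunk_metadata).map (fun p => ((PySem.Dict.mk p.2).getD "line_idx" 0, p.1)))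

-- ===== PRECONDITION & SPEC =====
-- Pre_ excludes exactly the inputs where A raises KeyError: a zipped metadata dict without the key 'line_idx'.
def Pre_reassemble_paragraphs (translated_chunks : List String) (chunk_metadata : List (List (String × Int))) : Prop :=
  ∀ p ∈ translated_chunks.zip chunk_metadata, ((PySem.Dict.mk p.2).get? "line_idx").isSome = true
instance (translated_chunks : List String) (chunk_metadata : List (List (String × Int))) : Decidable (Pre_reassemble_paragraphs translated_chunks chunk_metadata) := by unfold Pre_reassemble_paragraphs; infer_instance
def pvWitness_reassemble_paragraphs : List String × (List (List (String × Int))) :=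
  (["hello", "big", "world"], [[("line_idx", 1)], [("line_idx", 0)], [("line_idx", 1)]])

def Spec_reassemble_paragraphs (translated_chunks : List String) (chunk_metadata : List (List (String × Int))) (out : String) : Prop := out = reassemble_paragraphs_alt translated_chunks chunk_metadata
instance (translated_chunks : List String) (chunk_metadata : List (List (String × Int))) (out : String) : Decidable (Spec_reassemble_paragraphs translated_chunks chunk_metadata out) := by unfold Spec_reassemble_paragraphs; infer_instance

-- ===== CLAIM (what is proved, stated in full; the proofs are below) =====
def Claim_equal_reassemble_paragraphs : Prop := ∀ (translated_chunks : List String) (chunk_metadata : List (List (String × Int))), Dom_reassemble_paragraphs translated_chunks chunk_metadata → Pre_reassemble_paragraphs translated_chunks chunk_metadata → Spec_reassemble_paragraphs translated_chunks chunk_metadata (reassemble_paragraphs translated_chunks chunk_metadata)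

-- ===== LEMMAS AND PROOFS =====

-- A's loop step reads, on getD and keys, like a plain grouping 'modify'
theorem pvStepA_getD (d : PySem.Dict Int (List String)) (p : String × List (String × Int)) (k : Int) :
    (pvStepA d p).getD k [] =
      if k = (PySem.Dict.mk p.2).getD "line_idx" 0
      then d.getD ((PySem.Dict.mk p.2).getD "line_idx" 0) [] ++ [p.1]
      else d.getD k [] := by
  unfold pvStepA
  by_cases hc : d.contains ((PySem.Dict.mk p.2).getD "line_idx" 0) = true
  · rw [if_pos hc, PySem.Dict.getD_modify]
  · simp only [Bool.not_eq_true] at hc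
    rw [if_neg (by simp [hc]), PySem.Dict.getD_modify]
    by_cases hk : k = (PySem.Dict.mk p.2).getD "line_idx" 0
    · simp [hk, PySem.Dict.getD_of_not_contains d [] hc]
    · simp [hk, PySem.Dict.getD_insert]

theorem pvStepA_keys (d : PySem.Dict Int (List String)) (p : String × List (String × Int)) :
    (pvStepA d p).keys = PySem.Set.add d.keys ((PySem.Dict.mk p.2).getD "line_idx" 0) := by
  unfold pvStepA
  by_cases hc : d.contains ((PySem.Dict.mk p.2).getD "line_idx" 0) = true
  · have hm : ((PySem.Dict.mk p.2).getD "line_idx" 0) ∈ d.keys :=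
      (PySem.Dict.contains_iff_mem_keys _ _).1 hc
    rw [if_pos hc, PySem.Dict.keys_modify, PySem.Dict.keys_insert_of_contains _ _ hc,
      PySem.Set.add_of_mem hm]
  · simp only [Bool.not_eq_true] at hc
    have hm : ((PySem.Dict.mk p.2).getD "line_idx" 0) ∉ d.keys := fun h =>
      by simp [(PySem.Dict.contains_iff_mem_keys _ _).2 h] at hc
    rw [if_neg (by simp [hc]), PySem.Dict.keys_modify, PySem.Dict.keys_insert_of_contains,
      PySem.Dict.keys_insert_of_not_contains _ _ hc, PySem.Set.add_of_not_mem hm]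
    simp

-- fold versions over the whole zipped input
theorem foldA_getD (ps : List (String × List (String × Int))) (d : PySem.Dict Int (List String)) (k : Int) :
    (ps.foldl pvStepA d).getD k [] =
      d.getD k [] ++ ((ps.map (fun p => ((PySem.Dict.mk p.2).getD "line_idx" 0, p.1))).filter
        (fun q => q.1 == k)).map Prod.snd := by
  induction ps generalizing d with
  | nil => simp
  | cons p ps ih =>
    simp only [List.foldl_cons, List.map_cons, List.filter_cons]
    rw [ih, pvStepA_getD]
    by_cases hk : ((PySem.Dict.mk p.2).getD "line_idx" 0) = k
    · simp [hk]
    · simp [hk, Ne.symm hk]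

theorem foldA_keys (ps : List (String × List (String × Int))) (d : PySem.Dict Int (List String)) :
    (ps.foldl pvStepA d).keys =
      PySem.Set.update d.keys (ps.map (fun p => (PySem.Dict.mk p.2).getD "line_idx" 0)) := by
  induction ps generalizing d with
  | nil => simp [PySem.Set.update_nil]
  | cons p ps ih =>
    simp only [List.foldl_cons, List.map_cons]
    rw [ih, pvStepA_keys, PySem.Set.update_cons]

theorem reassemble_paragraphs_spec' (translated_chunks : List String) (chunk_metadata : List (List (String × Int))) :
    reassemble_paragraphs translated_chunks chunk_metadata = reassemble_paragraphs_alt translated_chunks chunk_metadata := by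
  unfold reassemble_paragraphs reassemble_paragraphs_alt pvJoinSorted pvBodyB
  set zs := translated_chunks.zip chunk_metadata with hzs
  set pairs := zs.map (fun p => ((PySem.Dict.mk p.2).getD "line_idx" 0, p.1)) with hpairs
  set d := zs.foldl pvStepA PySem.Dict.empty with hd
  have hkeys : d.keys = PySem.Set.ofList (pairs.map Prod.fst) := by
    rw [hd, foldA_keys, hpairs, List.map_map]
    simp only [PySem.Dict.keys_empty]
    rw [PySem.Set.update_nil_left]
    rfl
  have hget : ∀ k : Int, d.getD k [] = (pairs.filter (fun q => q.1 == k)).map Prod.snd := by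
    intro k; rw [hd, foldA_getD]; simp [hpairs]
  have hnodup : d.keys.Nodup := by rw [hkeys]; exact PySem.Set.nodup_ofList _
  set d2 := d.items.foldl (fun acc kv => acc.insert kv.1 (PySem.Str.join " " kv.2)) PySem.Dict.empty with hd2
  have hitems2 : d2.items = d.items.map (fun kv => (kv.1, PySem.Str.join " " kv.2)) := by
    rw [hd2,
      PySem.Dict.items_foldl_insert_fresh d.items Prod.fst (fun kv => PySem.Str.join " " kv.2)
        PySem.Dict.empty (by intro a _; simp [PySem.Dict.contains_empty])
        (by simpa [PySem.Dict.keys] using hnodup)]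
    rfl
  have hkeys2 : d2.keys = d.keys := by
    simp only [PySem.Dict.keys, hitems2, List.map_map]; rfl
  have hnodup2 : d2.keys.Nodup := hkeys2 ▸ hnodup
  have hget2 : ∀ k ∈ d.keys, d2.getD k "" = PySem.Str.join " " (d.getD k []) := by
    intro k hk
    have hmem : (k, d.getD k []) ∈ d.items := by
      rw [PySem.Dict.items_eq_map_keys d hnodup []]
      exact List.mem_map.2 ⟨k, hk, rfl⟩
    have hmem2 : (k, PySem.Str.join " " (d.getD k [])) ∈ d2.items := by
      rw [hitems2]; exact List.mem_map.2 ⟨(k, d.getD k []), hmem, rfl⟩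
    exact PySem.Dict.getD_of_mem_items d2 hmem2 hnodup2 ""
  rw [hkeys2, hkeys]
  apply congrArg
  apply List.map_congr_left
  intro k hk
  have hk' : k ∈ d.keys := by
    rw [hkeys]; exact (PySem.List.mem_sorted _ _ _ _).1 hk
  rw [hget2 k hk', hget k]

-- ===== VERDICT (by name: the statement is the Claim_ definition above) =====
theorem reassemble_paragraphs_spec : Claim_equal_reassemble_paragraphs := by
  intro tc cm _ _
  exact reassemble_paragraphs_spec' tc cm
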